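-- pv_equiv track=rewrite | github.com/TectonicRifts/ACMonsters | skills_module.py | get_skill_id
-- ===== SOURCE A (Python) =====
-- def get_skill_id(skill_name):
--     """Get the int id for a skill."""
--
--     skills = {
--         0: "Undefined",
--         1: "Axe",
--         2: "Bow",
--         3: "Crossbow",
--         4: "Dagger",
--         5: "Mace",
--         6: "MeleeDefense",
--         7: "MissileDefense",
--         8: "Sling",
--         9: "Spear",
--         10: "Staff",
--         11: "Sword",
--         12: "ThrownWeapon",
--         13: "UnarmedCombat",
--         14: "ArcaneLore",
--         15: "MagicDefense",
--         16: "ManaConversion",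
--         17: "Spellcraft",
--         18: "ItemAppraisal",
--         19: "PersonalAppraisal",
--         20: "Deception",
--         21: "Healing",
--         22: "Jump",
--         23: "Lockpick",
--         24: "Run",
--         25: "Awareness",
--         26: "ArmsAndArmorRepair",
--         27: "CreatureAppraisal",
--         28: "WeaponAppraisal",
--         29: "ArmorAppraisal",
--         30: "MagicItemAppraisal",
--         31: "CreatureEnchantment",
--         32: "ItemEnchantment",
--         33: "LifeMagic",
--         34: "WarMagic",
--         35: "Leadership",
--         36: "Loyalty",
--         37: "Fletching",
--         38: "Alchemy",
--         39: "Cooking",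
--         40: "Salvaging",
--         41: "TwoHandedCombat",
--         42: "Gearcraft",
--         43: "VoidMagic",
--         44: "HeavyWeapons",
--         45: "LightWeapons",
--         46: "FinesseWeapons",
--         47: "MissileWeapons",
--         48: "Shield",
--         49: "DualWield",
--         50: "Recklessness",
--         51: "SneakAttack",
--         52: "DirtyFighting",
--         53: "Challenge",
--         54: "Summoning"
--     }
--
--     skills = {value: key for key, value in skills.items()}
--
--     return skills.get(skill_name)
-- ===== SOURCE B (Python) =====
-- # Alphabetically sorted (name, id) table; lookup by hand-rolled binary search.
-- _SKILLS_BY_NAME = [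
--     ("Alchemy", 38),
--     ("ArcaneLore", 14),
--     ("ArmorAppraisal", 29),
--     ("ArmsAndArmorRepair", 26),
--     ("Awareness", 25),
--     ("Axe", 1),
--     ("Bow", 2),
--     ("Challenge", 53),
--     ("Cooking", 39),
--     ("CreatureAppraisal", 27),
--     ("CreatureEnchantment", 31),
--     ("Crossbow", 3),
--     ("Dagger", 4),
--     ("Deception", 20),
--     ("DirtyFighting", 52),
--     ("DualWield", 49),
--     ("FinesseWeapons", 46),
--     ("Fletching", 37),
--     ("Gearcraft", 42),
--     ("Healing", 21),
--     ("HeavyWeapons", 44),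
--     ("ItemAppraisal", 18),
--     ("ItemEnchantment", 32),
--     ("Jump", 22),
--     ("Leadership", 35),
--     ("LifeMagic", 33),
--     ("LightWeapons", 45),
--     ("Lockpick", 23),
--     ("Loyalty", 36),
--     ("Mace", 5),
--     ("MagicDefense", 15),
--     ("MagicItemAppraisal", 30),
--     ("ManaConversion", 16),
--     ("MeleeDefense", 6),
--     ("MissileDefense", 7),
--     ("MissileWeapons", 47),
--     ("PersonalAppraisal", 19),
--     ("Recklessness", 50),
--     ("Run", 24),
--     ("Salvaging", 40),
--     ("Shield", 48),
--     ("Sling", 8),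
--     ("SneakAttack", 51),
--     ("Spear", 9),
--     ("Spellcraft", 17),
--     ("Staff", 10),
--     ("Summoning", 54),
--     ("Sword", 11),
--     ("ThrownWeapon", 12),
--     ("TwoHandedCombat", 41),
--     ("UnarmedCombat", 13),
--     ("Undefined", 0),
--     ("VoidMagic", 43),
--     ("WarMagic", 34),
--     ("WeaponAppraisal", 28)
-- ]
--
--
-- def get_skill_id(skill_name):
--     """Get the int id for a skill."""
--     pairs = _SKILLS_BY_NAME
--     lo, hi = 0, len(pairs)
--     while lo < hi:
--         mid = (lo + hi) // 2
--         if pairs[mid][0] < skill_name: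
--             lo = mid + 1
--         else:
--             hi = mid
--     if lo < len(pairs) and pairs[lo][0] == skill_name:
--         return pairs[lo][1]
--     return None
-- ===== Notes on version B (the rewrite author's own statement) =====
-- stated objective: alternative
-- what changed: B replaces A's dict inversion + hash lookup with an alphabetically sorted (name, id) table searched by a hand-written binary search (bisect-left loop), returning None when the found slot does not hold the name.
import Mathlib
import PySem

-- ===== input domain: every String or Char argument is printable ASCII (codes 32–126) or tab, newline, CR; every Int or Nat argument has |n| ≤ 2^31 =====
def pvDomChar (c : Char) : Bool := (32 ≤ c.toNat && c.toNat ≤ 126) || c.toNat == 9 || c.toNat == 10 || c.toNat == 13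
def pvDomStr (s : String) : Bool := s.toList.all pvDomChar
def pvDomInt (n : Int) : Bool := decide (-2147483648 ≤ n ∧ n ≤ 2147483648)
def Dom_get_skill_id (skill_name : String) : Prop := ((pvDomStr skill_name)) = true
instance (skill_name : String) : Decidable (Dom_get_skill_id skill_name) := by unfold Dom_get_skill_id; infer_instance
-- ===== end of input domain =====

-- B replaces A's dict inversion + hash lookup by binary search over an alphabetically sorted (name, id) table; objective: alternative.

-- ===== PORT A =====
-- the {id: name} dict literal
def get_skill_id_skillsPairs : List (Int × String) :=
  [(0, "Undefined"), (1, "Axe"), (2, "Bow"), (3, "Crossbow"), (4, "Dagger"), (5, "Mace"),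
   (6, "MeleeDefense"), (7, "MissileDefense"), (8, "Sling"), (9, "Spear"), (10, "Staff"),
   (11, "Sword"), (12, "ThrownWeapon"), (13, "UnarmedCombat"), (14, "ArcaneLore"),
   (15, "MagicDefense"), (16, "ManaConversion"), (17, "Spellcraft"), (18, "ItemAppraisal"),
   (19, "PersonalAppraisal"), (20, "Deception"), (21, "Healing"), (22, "Jump"), (23, "Lockpick"),
   (24, "Run"), (25, "Awareness"), (26, "ArmsAndArmorRepair"), (27, "CreatureAppraisal"),
   (28, "WeaponAppraisal"), (29, "ArmorAppraisal"), (30, "MagicItemAppraisal"),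
   (31, "CreatureEnchantment"), (32, "ItemEnchantment"), (33, "LifeMagic"), (34, "WarMagic"),
   (35, "Leadership"), (36, "Loyalty"), (37, "Fletching"), (38, "Alchemy"), (39, "Cooking"),
   (40, "Salvaging"), (41, "TwoHandedCombat"), (42, "Gearcraft"), (43, "VoidMagic"),
   (44, "HeavyWeapons"), (45, "LightWeapons"), (46, "FinesseWeapons"), (47, "MissileWeapons"),
   (48, "Shield"), (49, "DualWield"), (50, "Recklessness"), (51, "SneakAttack"),
   (52, "DirtyFighting"), (53, "Challenge"), (54, "Summoning")]

def get_skill_id (skill_name : String) : Option Int :=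
  -- skills = { … }
  let skills : PySem.Dict Int String := PySem.Dict.ofList get_skill_id_skillsPairs
  -- skills = {value: key for key, value in skills.items()}
  let skills2 : PySem.Dict String Int :=
    skills.items.foldl (fun d p => d.insert p.2 p.1) PySem.Dict.empty
  -- return skills.get(skill_name)
  skills2.get? skill_name

-- ===== PORT B =====
-- _SKILLS_BY_NAME: the (name, id) pairs in alphabetical order of name
def pvSkillsByName : List (String × Int) :=
  [("Alchemy", 38),
   ("ArcaneLore", 14),
   ("ArmorAppraisal", 29),
   ("ArmsAndArmorRepair", 26),
   ("Awareness", 25),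
   ("Axe", 1),
   ("Bow", 2),
   ("Challenge", 53),
   ("Cooking", 39),
   ("CreatureAppraisal", 27),
   ("CreatureEnchantment", 31),
   ("Crossbow", 3),
   ("Dagger", 4),
   ("Deception", 20),
   ("DirtyFighting", 52),
   ("DualWield", 49),
   ("FinesseWeapons", 46),
   ("Fletching", 37),
   ("Gearcraft", 42),
   ("Healing", 21),
   ("HeavyWeapons", 44),
   ("ItemAppraisal", 18),
   ("ItemEnchantment", 32),
   ("Jump", 22),
   ("Leadership", 35),
   ("LifeMagic", 33),
   ("LightWeapons", 45),
   ("Lockpick", 23),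
   ("Loyalty", 36),
   ("Mace", 5),
   ("MagicDefense", 15),
   ("MagicItemAppraisal", 30),
   ("ManaConversion", 16),
   ("MeleeDefense", 6),
   ("MissileDefense", 7),
   ("MissileWeapons", 47),
   ("PersonalAppraisal", 19),
   ("Recklessness", 50),
   ("Run", 24),
   ("Salvaging", 40),
   ("Shield", 48),
   ("Sling", 8),
   ("SneakAttack", 51),
   ("Spear", 9),
   ("Spellcraft", 17),
   ("Staff", 10),
   ("Summoning", 54),
   ("Sword", 11),
   ("ThrownWeapon", 12),
   ("TwoHandedCombat", 41),
   ("UnarmedCombat", 13),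
   ("Undefined", 0),
   ("VoidMagic", 43),
   ("WarMagic", 34),
   ("WeaponAppraisal", 28)]

-- the while-loop of Source B: bisect-left on pairs by first component (indices stay in [0, len])
def pvBSearch (pairs : List (String × Int)) (s : String) (lo hi : Nat) : Nat :=
  if _h : lo < hi then
    -- mid = (lo + hi) // 2; Python's str '<' is code-point lexicographic = Lean's '<' on toList (PYSEM.md)
    if (pairs.getD ((lo + hi) / 2) ("", 0)).1.toList < s.toList then
      pvBSearch pairs s ((lo + hi) / 2 + 1) hi
    else
      pvBSearch pairs s lo ((lo + hi) / 2)
  else lo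
termination_by hi - lo
decreasing_by all_goals omega

def get_skill_id_alt (skill_name : String) : Option Int :=
  let pairs := pvSkillsByName
  -- lo, hi = 0, len(pairs); while lo < hi: …
  let lo := pvBSearch pairs skill_name 0 pairs.length
  -- if lo < len(pairs) and pairs[lo][0] == skill_name: return pairs[lo][1]  else return None
  if lo < pairs.length && (pairs.getD lo ("", 0)).1 == skill_name then
    some (pairs.getD lo ("", 0)).2
  else
    none

-- ===== PRECONDITION & SPEC =====
def Spec_get_skill_id (skill_name : String) (out : Option Int) : Prop := out = get_skill_id_alt skill_name
instance (skill_name : String) (out : Option Int) : Decidable (Spec_get_skill_id skill_name out) := by unfold Spec_get_skill_id; infer_instance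

-- ===== CLAIM (what is proved, stated in full; the proofs are below) =====
def Claim_equal_get_skill_id : Prop := ∀ (skill_name : String), Dom_get_skill_id skill_name → Spec_get_skill_id skill_name (get_skill_id skill_name)

-- ===== LEMMAS AND PROOFS =====

-- the name of skill id i, in id order (used only to state the common characterisation)
def pvNames : List String :=
  ["Undefined", "Axe", "Bow", "Crossbow", "Dagger", "Mace",
   "MeleeDefense", "MissileDefense", "Sling", "Spear", "Staff",
   "Sword", "ThrownWeapon", "UnarmedCombat", "ArcaneLore",
   "MagicDefense", "ManaConversion", "Spellcraft", "ItemAppraisal",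
   "PersonalAppraisal", "Deception", "Healing", "Jump", "Lockpick",
   "Run", "Awareness", "ArmsAndArmorRepair", "CreatureAppraisal",
   "WeaponAppraisal", "ArmorAppraisal", "MagicItemAppraisal",
   "CreatureEnchantment", "ItemEnchantment", "LifeMagic", "WarMagic",
   "Leadership", "Loyalty", "Fletching", "Alchemy", "Cooking",
   "Salvaging", "TwoHandedCombat", "Gearcraft", "VoidMagic",
   "HeavyWeapons", "LightWeapons", "FinesseWeapons", "MissileWeapons",
   "Shield", "DualWield", "Recklessness", "SneakAttack",
   "DirtyFighting", "Challenge", "Summoning"]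

-- (name, k), (name, k+1), … : the items of A's inverted dict as a function of the name list
def pvPairAux : List String → Int → List (String × Int)
  | [], _ => []
  | n :: t, k => (n, k) :: pvPairAux t (k + 1)

-- first-match lookup in the enumerated pair list is index search shifted by k
theorem pvGet_pairAux (ns : List String) (k : Int) (s : String) :
    (PySem.Dict.mk (pvPairAux ns k)).get? s
      = (PySem.List.index? ns s).map (fun n : Nat => k + (n : Int)) := by
  induction ns generalizing k with
  | nil => simp [pvPairAux, PySem.Dict.get?, PySem.List.index?]
  | cons n t ih =>
      by_cases h : n = s
      · subst h
        rw [PySem.List.index?_cons_self]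
        simp [pvPairAux, PySem.Dict.get?_mk_cons]
      · rw [PySem.List.index?_cons_of_ne t h]
        simp only [pvPairAux, PySem.Dict.get?_mk_cons, beq_iff_eq, h, if_false,
          ih (k + 1), Option.map_map]
        refine congrArg (fun fn => Option.map fn (PySem.List.index? t s)) ?_
        funext n
        simp [Function.comp]
        ring

-- A's inverted dict is exactly the enumeration of the name list (closed computation)
theorem pvInverted_eq :
    (PySem.Dict.ofList get_skill_id_skillsPairs).items.foldl
        (fun d p => d.insert p.2 p.1) (PySem.Dict.empty : PySem.Dict String Int)
      = PySem.Dict.mk (pvPairAux pvNames 0) := by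
  set_option maxRecDepth 8192 in decide

-- A's result characterised: the index of the name in id order
theorem pvA_eq (s : String) :
    get_skill_id s = (PySem.List.index? pvNames s).map (fun n : Nat => (n : Int)) := by
  simp only [get_skill_id]
  rw [pvInverted_eq, pvGet_pairAux]
  simp

-- concrete facts about the sorted table (closed computations)
theorem pvSorted : pvSkillsByName.Pairwise (fun a b => a.1.toList < b.1.toList) := by
  set_option maxRecDepth 8192 in decide

theorem pvEnum : ∀ k, k < 55 → (pvNames.getD k "", (k : Int)) ∈ pvSkillsByName := by
  set_option maxRecDepth 8192 in decide

theorem pvFstMem : ∀ p ∈ pvSkillsByName, p.1 ∈ pvNames := by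
  set_option maxRecDepth 8192 in decide

theorem pvNamesLen : pvNames.length = 55 := by decide

-- binary-search loop invariant: the result separates keys < s from keys ≥ s
theorem pvBSearch_spec (pairs : List (String × Int)) (s : String)
    (hsorted : pairs.Pairwise (fun a b => a.1.toList < b.1.toList)) (lo hi : Nat)
    (hlohi : lo ≤ hi) (hhi : hi ≤ pairs.length)
    (hbelow : ∀ i, (h : i < pairs.length) → i < lo → pairs[i].1.toList < s.toList)
    (habove : ∀ i, (h : i < pairs.length) → hi ≤ i → ¬ pairs[i].1.toList < s.toList) :
    pvBSearch pairs s lo hi ≤ pairs.length ∧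
    (∀ i, (h : i < pairs.length) → i < pvBSearch pairs s lo hi → pairs[i].1.toList < s.toList) ∧
    (∀ i, (h : i < pairs.length) → pvBSearch pairs s lo hi ≤ i → ¬ pairs[i].1.toList < s.toList) := by
  have hmono := List.pairwise_iff_getElem.mp hsorted
  unfold pvBSearch
  split
  · rename_i hlt
    have hmidlt : (lo + hi) / 2 < pairs.length := by omega
    rw [List.getD_eq_getElem pairs ("", 0) hmidlt]
    split
    · rename_i hkey
      exact pvBSearch_spec pairs s hsorted ((lo + hi) / 2 + 1) hi (by omega) hhi
        (fun i h hi' => by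
          rcases Nat.lt_or_ge i ((lo + hi) / 2) with hc | hc
          · exact lt_trans (hmono i ((lo + hi) / 2) h hmidlt hc) hkey
          · have : i = (lo + hi) / 2 := by omega
            subst this; exact hkey)
        habove
    · rename_i hkey
      exact pvBSearch_spec pairs s hsorted lo ((lo + hi) / 2) (by omega) (by omega)
        hbelow
        (fun i h hi' => by
          rcases Nat.lt_or_ge ((lo + hi) / 2) i with hc | hc
          · intro habs
            exact hkey (lt_trans (hmono ((lo + hi) / 2) i hmidlt h hc) habs)
          · have : i = (lo + hi) / 2 := by omega
            subst this; exact hkey)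
  · rename_i hge
    have : lo = hi := by omega
    subst this
    exact ⟨le_trans hlohi hhi, fun i h hi' => hbelow i h hi', fun i h hi' => habove i h hi'⟩
termination_by hi - lo
decreasing_by all_goals omega

-- B's result characterised the same way
theorem pvB_eq (s : String) :
    get_skill_id_alt s = (PySem.List.index? pvNames s).map (fun n : Nat => (n : Int)) := by
  have hmono := List.pairwise_iff_getElem.mp pvSorted
  obtain ⟨hle, hbelow, habove⟩ :=
    pvBSearch_spec pvSkillsByName s pvSorted 0 pvSkillsByName.length (Nat.zero_le _) le_rfl
      (fun i h hi' => by omega) (fun i h hi' => by omega)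
  set r := pvBSearch pvSkillsByName s 0 pvSkillsByName.length with hr
  cases hidx : PySem.List.index? pvNames s with
  | none =>
      have hnm : s ∉ pvNames := (PySem.List.index?_eq_none_iff _ _).mp hidx
      simp only [get_skill_id_alt, ← hr]
      by_cases hrlt : r < pvSkillsByName.length
      · have hmem : pvSkillsByName[r] ∈ pvSkillsByName := List.getElem_mem hrlt
        have hfst : pvSkillsByName[r].1 ∈ pvNames := pvFstMem _ hmem
        have hne : pvSkillsByName[r].1 ≠ s := fun habs => hnm (habs ▸ hfst)
        rw [List.getD_eq_getElem pvSkillsByName ("", 0) hrlt]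
        simp [hne]
      · simp [hrlt]
  | some k =>
      obtain ⟨hk, hks, _⟩ := PySem.List.getElem_of_index?_eq_some hidx
      have hk55 : k < 55 := by rw [pvNamesLen] at hk; exact hk
      have hmemk : (s, (k : Int)) ∈ pvSkillsByName := by
        have := pvEnum k hk55
        rwa [List.getD_eq_getElem pvNames "" hk, hks] at this
      obtain ⟨j, hj, hpj⟩ := List.mem_iff_getElem.mp hmemk
      have hj1 : pvSkillsByName[j].1 = s := by rw [hpj]
      have hrj : r ≤ j := by
        by_contra habs
        have := hbelow j hj (by omega)
        rw [hj1] at this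
        exact lt_irrefl _ this
      have hrj' : ¬ r < j := by
        intro hlt
        have hra : ¬ pvSkillsByName[r].1.toList < s.toList := habove r (by omega) le_rfl
        have := hmono r j (by omega) hj hlt
        rw [hj1] at this
        exact hra this
      have hreq : r = j := by omega
      simp only [get_skill_id_alt, ← hr, hreq]
      rw [List.getD_eq_getElem pvSkillsByName ("", 0) hj, hpj]
      simp [hj]

-- ===== VERDICT (by name: the statement is the Claim_ definition above) =====
theorem get_skill_id_spec : Claim_equal_get_skill_id := by
  intro s _
  unfold Spec_get_skill_id
  rw [pvA_eq, pvB_eq]
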